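-- pv_equiv track=rewrite | github.com/ElenaDatso/python_1 | Q1.py | func
-- ===== SOURCE A (Python) =====
-- def func(numbers):
--     result = []
--     ####### add your code below #######
--     for number in numbers:
--         if number % 6 == 0 or number == 949:
--             result.append(number)
--             if number == 949:
--                 break
--     ####### add your code above #######
--     return result
-- ===== SOURCE B (Python) =====
-- def func(numbers):
--     try:
--         cut = numbers.index(949) + 1
--     except ValueError:
--         cut = len(numbers)
--     return [n for n in numbers[:cut] if n % 6 == 0 or n == 949]
-- ===== Notes on version B (the rewrite author's own statement) =====
-- stated objective: simpler
-- what changed: Replaces the loop with an inline break by locating the 949 cut point first (list.index) and then applying one plain filter comprehension over the prefix slice.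
import Mathlib
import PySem

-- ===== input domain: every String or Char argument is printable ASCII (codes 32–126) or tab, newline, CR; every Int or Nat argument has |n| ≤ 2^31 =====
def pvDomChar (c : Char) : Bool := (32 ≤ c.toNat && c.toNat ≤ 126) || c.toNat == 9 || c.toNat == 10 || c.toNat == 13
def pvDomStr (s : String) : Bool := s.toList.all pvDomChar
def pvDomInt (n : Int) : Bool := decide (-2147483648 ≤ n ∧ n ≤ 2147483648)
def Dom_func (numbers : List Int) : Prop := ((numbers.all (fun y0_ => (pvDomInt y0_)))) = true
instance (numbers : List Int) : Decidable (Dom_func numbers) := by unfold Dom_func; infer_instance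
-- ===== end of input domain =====

-- B computes the 949 cut point first and then filters the prefix with one comprehension (simpler decomposition).


-- ===== PORT A =====
-- loop with append and break, as structural recursion
def func (numbers : List Int) : List Int :=
  match numbers with
  | [] => []
  | n :: rest =>
    if PySem.Int.mod n 6 == 0 || n == 949 then
      if n == 949 then [n] else n :: func rest
    else func rest

-- ===== PORT B =====
def func_alt (numbers : List Int) : List Int :=
  let cut : Nat :=
    match PySem.List.index? numbers 949 with
    | some i => i + 1
    | none => numbers.length
  (numbers.take cut).filter (fun n => PySem.Int.mod n 6 == 0 || n == 949)

-- ===== PRECONDITION & SPEC =====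
def Spec_func (numbers : List Int) (out : List Int) : Prop := out = func_alt numbers
instance (numbers : List Int) (out : List Int) : Decidable (Spec_func numbers out) := by unfold Spec_func; infer_instance

-- ===== CLAIM (what is proved, stated in full; the proofs are below) =====
def Claim_equal_func : Prop := ∀ (numbers : List Int), Dom_func numbers → Spec_func numbers (func numbers)

-- ===== LEMMAS AND PROOFS =====
theorem func_eq_alt (numbers : List Int) : func numbers = func_alt numbers := by
  induction numbers with
  | nil => rfl
  | cons n rest ih =>
    by_cases h949 : n = 949
    · subst h949
      simp only [func, func_alt, PySem.List.index?_cons_self, List.take_succ_cons,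
        List.take_zero, List.filter_cons, List.filter_nil]
      norm_num
    · have hidx : PySem.List.index? (n :: rest) 949 =
        (PySem.List.index? rest 949).map (· + 1) :=
        PySem.List.index?_cons_of_ne rest h949
      simp only [func, func_alt, hidx]
      cases hrest : PySem.List.index? rest 949 with
      | some i =>
        simp only [Option.map_some, List.take_succ_cons, List.filter_cons]
        rw [ih]
        simp only [func_alt, hrest]
        by_cases hm : PySem.Int.mod n 6 = 0 <;>
          simp [h949]
      | none =>
        simp only [Option.map_none, List.length_cons, List.take_succ_cons, List.filter_cons]
        rw [ih]
        simp only [func_alt, hrest]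
        by_cases hm : PySem.Int.mod n 6 = 0 <;>
          simp [h949]

-- ===== VERDICT (by name: the statement is the Claim_ definition above) =====
theorem func_spec : Claim_equal_func := by
  intro numbers _
  exact func_eq_alt numbers
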